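-- pv_equiv track=rewrite | github.com/MaviOG/SistemiOdlo-anjaVaja1 | Main.py | Savage
-- ===== SOURCE A (Python) =====
-- def Savage(Pozitivno,Negativno):
--     SavagePozitiv = []
--     SavageNegativ = []
--     SavageMax = []
--     MaxPozitiv = max(Pozitivno)
--     MaxNegativ = max(Negativno)
--     for x in range (len(Pozitivno)):
--         SavagePozitiv.append(MaxPozitiv - Pozitivno[x])
--         SavageNegativ.append(MaxNegativ - Negativno[x])
--     for y in range(len(SavageNegativ)):
--         SavageMax.append(max(SavageNegativ[y],SavagePozitiv[y]))
--
--     min_value = min(SavageMax)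
--     index = SavageMax.index(min_value)
--     return min(SavageMax),index
-- ===== SOURCE B (Python) =====
-- def Savage(Pozitivno, Negativno):
--     MaxPozitiv = max(Pozitivno)
--     MaxNegativ = max(Negativno)
--     best = None
--     for x in range(len(Pozitivno)):
--         v = max(MaxNegativ - Negativno[x], MaxPozitiv - Pozitivno[x])
--         if best is None or v < best[0]:
--             best = (v, x)
--     return best
-- ===== Notes on version B (the rewrite author's own statement) =====
-- stated objective: simpler
-- what changed: Replaces building three intermediate lists followed by two min() passes and a .index() scan with a single accumulating pass that keeps the running (best_value, best_index), updating only on strictly smaller values to reproduce first-occurrence ties.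
import Mathlib
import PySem

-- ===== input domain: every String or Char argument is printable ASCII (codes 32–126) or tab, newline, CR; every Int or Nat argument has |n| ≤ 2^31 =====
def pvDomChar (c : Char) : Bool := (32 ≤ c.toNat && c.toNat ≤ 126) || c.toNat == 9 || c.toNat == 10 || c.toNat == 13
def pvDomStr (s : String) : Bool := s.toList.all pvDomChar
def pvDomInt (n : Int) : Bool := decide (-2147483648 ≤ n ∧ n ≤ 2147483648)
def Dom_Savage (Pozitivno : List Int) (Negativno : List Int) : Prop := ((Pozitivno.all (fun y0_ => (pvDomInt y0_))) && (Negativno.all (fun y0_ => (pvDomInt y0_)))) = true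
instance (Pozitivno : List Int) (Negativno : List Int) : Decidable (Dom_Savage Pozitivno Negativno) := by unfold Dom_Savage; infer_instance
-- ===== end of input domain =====

-- B replaces A's three intermediate lists + two min() passes + .index() scan by a single
-- accumulating pass keeping the running (best value, best index); objective: simpler (one pass, no temporaries).


-- ===== PORT A =====
-- literal transliteration of A: build SavagePozitiv/SavageNegativ, then SavageMax,
-- then min and .index.  max()/min() on an empty list (Python ValueError) is matched on
-- the `none` branch; Pre_ excludes those inputs (and the IndexError on length mismatch).
def SavageLoop1 (MaxPozitiv MaxNegativ : Int) (Pozitivno Negativno : List Int) : List Int × List Int :=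
  (PySem.List.pyRange 0 Pozitivno.length 1).foldl
    (fun (acc : List Int × List Int) x =>
      (acc.1 ++ [MaxPozitiv - PySem.List.pyGetD Pozitivno x 0],
       acc.2 ++ [MaxNegativ - PySem.List.pyGetD Negativno x 0])) ([], [])

def SavageLoop2 (SPN : List Int × List Int) : List Int :=
  (PySem.List.pyRange 0 SPN.2.length 1).foldl
    (fun acc y => acc ++ [max (PySem.List.pyGetD SPN.2 y 0) (PySem.List.pyGetD SPN.1 y 0)]) []

def Savage (Pozitivno : List Int) (Negativno : List Int) : Int × Int :=
  match PySem.List.max? Pozitivno (fun y => y), PySem.List.max? Negativno (fun y => y) with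
  | some MaxPozitiv, some MaxNegativ =>
    let SavageMax := SavageLoop2 (SavageLoop1 MaxPozitiv MaxNegativ Pozitivno Negativno)
    match PySem.List.min? SavageMax (fun y => y) with
    | some min_value =>
        ((PySem.List.min? SavageMax (fun y => y)).getD 0,
         ((PySem.List.index? SavageMax min_value).getD 0 : Int))
    | none => (0, 0)
  | _, _ => (0, 0)

-- ===== PORT B =====
-- literal transliteration of Source B: one pass, best = None / (v, x), strict '<' update.
def SavageAltLoop (MaxPozitiv MaxNegativ : Int) (Pozitivno Negativno : List Int) : Option (Int × Int) :=
  (PySem.List.pyRange 0 Pozitivno.length 1).foldl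
    (fun (best : Option (Int × Int)) x =>
      let v := max (MaxNegativ - PySem.List.pyGetD Negativno x 0)
                   (MaxPozitiv - PySem.List.pyGetD Pozitivno x 0)
      best.elim (some (v, x)) (fun b => if v < b.1 then some (v, x) else b)) none

def Savage_alt (Pozitivno : List Int) (Negativno : List Int) : Int × Int :=
  (((PySem.List.max? Pozitivno (fun y => y)).bind (fun MaxPozitiv =>
    (PySem.List.max? Negativno (fun y => y)).bind (fun MaxNegativ =>
      SavageAltLoop MaxPozitiv MaxNegativ Pozitivno Negativno)))).getD (0, 0)

-- ===== PRECONDITION & SPEC =====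
-- Pre_ excludes exactly the inputs where Python A raises: the ValueError of max()/min()
-- on an empty list and the IndexError when Negativno is shorter than Pozitivno.
def Pre_Savage (Pozitivno : List Int) (Negativno : List Int) : Prop :=
  Pozitivno ≠ [] ∧ Pozitivno.length ≤ Negativno.length
instance (Pozitivno : List Int) (Negativno : List Int) : Decidable (Pre_Savage Pozitivno Negativno) := by unfold Pre_Savage; infer_instance
def pvWitness_Savage : List Int × List Int := ([3, 1, 4], [2, 2, 5])

def Spec_Savage (Pozitivno : List Int) (Negativno : List Int) (out : Int × Int) : Prop := out = Savage_alt Pozitivno Negativno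
instance (Pozitivno : List Int) (Negativno : List Int) (out : Int × Int) : Decidable (Spec_Savage Pozitivno Negativno out) := by unfold Spec_Savage; infer_instance

-- ===== CLAIM (what is proved, stated in full; the proofs are below) =====
def Claim_equal_Savage : Prop := ∀ (Pozitivno : List Int) (Negativno : List Int), Dom_Savage Pozitivno Negativno → Pre_Savage Pozitivno Negativno → Spec_Savage Pozitivno Negativno (Savage Pozitivno Negativno)

-- ===== LEMMAS AND PROOFS =====

-- the common per-index value both programs compute
def pvVal (MP MN : Int) (P N : List Int) (k : Nat) : Int :=
  max (MN - N.getD k 0) (MP - P.getD k 0)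

-- B's loop body over Nat indices
def pvStep (g : Nat → Int) (best : Option (Int × Int)) (k : Nat) : Option (Int × Int) :=
  match best with
  | none => some (g k, (k : Int))
  | some b => if g k < b.1 then some (g k, (k : Int)) else b

theorem pvFoldPair (f h : Nat → Int) (l : List Nat) (a b : List Int) :
    l.foldl (fun (acc : List Int × List Int) k => (acc.1 ++ [f k], acc.2 ++ [h k])) (a, b)
      = (a ++ l.map f, b ++ l.map h) := by
  induction l generalizing a b with
  | nil => simp
  | cons x t ih => simp [List.foldl_cons, ih]

theorem pvFoldApp (f : Nat → Int) (l : List Nat) (a : List Int) :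
    l.foldl (fun acc k => acc ++ [f k]) a = a ++ l.map f := by
  induction l generalizing a with
  | nil => simp
  | cons x t ih => simp [List.foldl_cons, ih]

theorem pvMin?_append_singleton (L : List Int) (x m : Int)
    (h : PySem.List.min? L (fun y => y) = some m) :
    PySem.List.min? (L ++ [x]) (fun y => y) = some (min m x) := by
  cases L with
  | nil =>
      have hnone : PySem.List.min? ([] : List Int) (fun y => y) = none :=
        (PySem.List.min?_eq_none_iff _ _).mpr rfl
      rw [hnone] at h; cases h
  | cons a t =>
      rw [PySem.List.min?_id_cons] at h
      injection h with h
      rw [List.cons_append, PySem.List.min?_id_cons, List.foldl_append]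
      simp [h]

-- characterisation of B's fold: value = minimum of the mapped list, index = its first position
theorem pvFold_char (g : Nat → Int) (n : Nat) (hn : 0 < n) :
    ∃ m i, PySem.List.min? ((List.range n).map g) (fun y => y) = some m ∧
      PySem.List.index? ((List.range n).map g) m = some i ∧
      (List.range n).foldl (pvStep g) none = some (m, (i : Int)) := by
  induction n with
  | zero => omega
  | succ n ih =>
      by_cases hn0 : n = 0
      · subst hn0
        refine ⟨g 0, 0, ?_, ?_, ?_⟩
        · simp [List.range_succ, PySem.List.min?_id_cons]
        · simp [List.range_succ]
        · simp [List.range_succ, pvStep]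
      · obtain ⟨m, i, hmin, hidx, hfold⟩ := ih (Nat.pos_of_ne_zero hn0)
        set L := (List.range n).map g with hL
        have hlen : L.length = n := by simp [hL]
        have hminL : ∀ y ∈ L, m ≤ y := by
          intro y hy
          exact PySem.List.min?_isMin hmin y hy
        have happ : (List.range (n+1)).map g = L ++ [g n] := by
          simp [List.range_succ, hL]
        have hfold' : (List.range (n+1)).foldl (pvStep g) none
            = pvStep g (some (m, (i : Int))) n := by
          rw [List.range_succ, List.foldl_append, hfold]; rfl
        by_cases hlt : g n < m
        · refine ⟨g n, n, ?_, ?_, ?_⟩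
          · rw [happ, pvMin?_append_singleton L (g n) m hmin,
              min_eq_right (le_of_lt hlt)]
          · have hnot : g n ∉ L := fun hmem => absurd (hminL _ hmem) (not_le.mpr hlt)
            rw [happ, PySem.List.index?_append_singleton_self L (g n) hnot, hlen]
          · rw [hfold', pvStep, if_pos hlt]
        · refine ⟨m, i, ?_, ?_, ?_⟩
          · rw [happ, pvMin?_append_singleton L (g n) m hmin,
              min_eq_left (not_lt.mp hlt)]
          · have hmem : m ∈ L := PySem.List.min?_mem hmin
            rw [happ, PySem.List.index?_append_of_mem _ hmem, hidx]
          · rw [hfold', pvStep, if_neg hlt]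

theorem pvLoop1_eq (MP MN : Int) (P N : List Int) :
    SavageLoop1 MP MN P N
      = ((List.range P.length).map (fun k => MP - P.getD k 0),
         (List.range P.length).map (fun k => MN - N.getD k 0)) := by
  unfold SavageLoop1
  rw [PySem.List.pyRange_zero_nat, List.foldl_map]
  simp only [PySem.List.pyGetD_natCast]
  simpa using pvFoldPair (fun k => MP - P.getD k 0) (fun k => MN - N.getD k 0) (List.range P.length) [] []

theorem pvLoop2_eq (f h : Nat → Int) (n : Nat) :
    SavageLoop2 ((List.range n).map f, (List.range n).map h)
      = (List.range n).map (fun k => max (h k) (f k)) := by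
  unfold SavageLoop2
  simp only [List.length_map, List.length_range]
  rw [PySem.List.pyRange_zero_nat, List.foldl_map]
  simp only [PySem.List.pyGetD_natCast]
  rw [pvFoldApp (fun k => max (((List.range n).map h).getD k 0) (((List.range n).map f).getD k 0))
      (List.range n) []]
  simp only [List.nil_append]
  apply List.map_congr_left
  intro k hk
  have hk' : k < n := List.mem_range.mp hk
  rw [PySem.List.getD_map_range f n k 0 hk', PySem.List.getD_map_range h n k 0 hk']

theorem pvLoopB_eq (MP MN : Int) (P N : List Int) :
    SavageAltLoop MP MN P N
      = (List.range P.length).foldl (pvStep (pvVal MP MN P N)) none := by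
  unfold SavageAltLoop
  rw [PySem.List.pyRange_zero_nat, List.foldl_map]
  congr 1
  funext best k
  cases best with
  | none => simp [pvStep, pvVal]
  | some b => simp [pvStep, pvVal]

-- ===== VERDICT (by name: the statement is the Claim_ definition above) =====
theorem Savage_spec : Claim_equal_Savage := by
  intro P N _hdom hpre
  obtain ⟨hne, _hlen⟩ := hpre
  unfold Spec_Savage Savage Savage_alt
  obtain ⟨MP, hMP⟩ : ∃ MP, PySem.List.max? P (fun y => y) = some MP := by
    cases hP : PySem.List.max? P (fun y => y) with
    | none => exact absurd ((PySem.List.max?_eq_none_iff _ _).mp hP) hne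
    | some v => exact ⟨v, rfl⟩
  have hNne : N ≠ [] := by
    intro h; subst h; simp at _hlen; exact hne _hlen
  obtain ⟨MN, hMN⟩ : ∃ MN, PySem.List.max? N (fun y => y) = some MN := by
    cases hN : PySem.List.max? N (fun y => y) with
    | none => exact absurd ((PySem.List.max?_eq_none_iff _ _).mp hN) hNne
    | some v => exact ⟨v, rfl⟩
  rw [hMP, hMN]
  set n := P.length with hn
  have hn0 : 0 < n := List.length_pos_iff.mpr hne
  obtain ⟨m, i, hmin, hidx, hfold⟩ := pvFold_char (pvVal MP MN P N) n hn0
  have hSM : SavageLoop2 (SavageLoop1 MP MN P N) = (List.range n).map (pvVal MP MN P N) := by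
    rw [pvLoop1_eq, ← hn, pvLoop2_eq]
    rfl
  have hB : SavageAltLoop MP MN P N = some (m, (i : Int)) := by
    rw [pvLoopB_eq, ← hn, hfold]
  dsimp only
  rw [hSM, hmin]
  show _ = ((SavageAltLoop MP MN P N).getD (0, 0))
  rw [hB]
  rw [PySem.List.index?_eq_idxOf?] at hidx
  simp [hidx]
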